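-- pv_equiv track=rewrite | github.com/azwdevops/coding-challenges | g_solutions/sliding_window/medium.py | numberOfSpecialKLengthSubstrings
-- ===== SOURCE A (Python) =====
-- def numberOfSpecialKLengthSubstrings(s: str, k: int) -> int:
--   if k > len(s):
--     return 0
--   left = 0
--   count = 0
--   char_set = set()
--   for right in range(len(s)):
--     # ensure that the window contains unique characters
--     while s[right] in char_set:
--       char_set.remove(s[left])
--       left += 1
--     char_set.add(s[right])
--     # check if we have a valid window of size k
--     if right - left + 1 == k:
--       count += 1
--       # move left to shrink the window for next iteration
--       char_set.remove(s[left])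
--       left += 1
--
--   return count
-- ===== SOURCE B (Python) =====
-- def numberOfSpecialKLengthSubstrings(s: str, k: int) -> int:
--   # a k-length substring needs k >= 1 and k <= len(s)
--   if k < 1 or k > len(s):
--     return 0
--   return sum(1 for i in range(len(s) - k + 1) if len(set(s[i:i + k])) == k)
-- ===== Notes on version B (the rewrite author's own statement) =====
-- stated objective: simpler
-- what changed: Replaced the incremental two-pointer sliding window with mutable set state by a single comprehension that checks each k-length slice independently via len(set(s[i:i+k])) == k, guarded by the natural k-length condition 1 <= k <= len(s).
import Mathlib
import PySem

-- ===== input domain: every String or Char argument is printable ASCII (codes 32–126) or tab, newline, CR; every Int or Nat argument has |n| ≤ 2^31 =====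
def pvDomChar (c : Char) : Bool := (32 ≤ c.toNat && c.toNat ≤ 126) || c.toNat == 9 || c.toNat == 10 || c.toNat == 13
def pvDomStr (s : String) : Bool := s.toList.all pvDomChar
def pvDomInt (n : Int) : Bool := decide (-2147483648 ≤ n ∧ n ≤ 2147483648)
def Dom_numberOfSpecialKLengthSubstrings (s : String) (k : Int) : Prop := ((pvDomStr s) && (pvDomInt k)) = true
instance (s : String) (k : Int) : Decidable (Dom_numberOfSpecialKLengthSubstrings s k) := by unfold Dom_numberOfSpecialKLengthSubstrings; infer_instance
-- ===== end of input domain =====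

-- B replaces A's incremental two-pointer sliding window by one independent
-- distinctness check per window (len(set(s[i:i+k])) == k); objective: simpler.

-- ===== PORT A =====
-- the inner `while s[right] in char_set: char_set.remove(s[left]); left += 1`.
-- `fuel` only makes the recursion total; on every reached state fuel ≥ right - left,
-- so the 0-branch is never taken.  Indices `left`,`right` are always in range, so
-- `cs.getD _ ' '` is exactly Python's s[i], and `char_set.remove(s[left])` (whose
-- argument is always a member of the set here) is Set.discard.
def pvWhileA (cs : List Char) (c : Char) : Nat → Nat → PySem.Set Char → Nat × PySem.Set Char
  | fuel, left, cset =>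
    if PySem.Set.contains cset c then
      match fuel with
      | 0 => (left, cset)
      | fuel' + 1 => pvWhileA cs c fuel' (left + 1) (PySem.Set.discard cset (cs.getD left ' '))
    else (left, cset)

-- one iteration of A's `for right in range(len(s))` loop; state = (left, count, char_set)
def pvStepA (cs : List Char) (k : Int) (st : Nat × Int × PySem.Set Char) (right : Nat) :
    Nat × Int × PySem.Set Char :=
  let c := cs.getD right ' '
  let p := pvWhileA cs c cs.length st.1 st.2.2
  let cset := PySem.Set.add p.2 c
  if ((right : Int) - (p.1 : Int) + 1 = k) then
    (p.1 + 1, st.2.1 + 1, PySem.Set.discard cset (cs.getD p.1 ' '))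
  else
    (p.1, st.2.1, cset)

def numberOfSpecialKLengthSubstrings (s : String) (k : Int) : Int :=
  let cs := s.toList
  if ((cs.length : Int)) < k then 0
  else ((List.range cs.length).foldl (pvStepA cs k) (0, 0, PySem.Set.empty)).2.1

-- ===== PORT B =====
-- `s[i:i+k]` with 0 ≤ i and k ≥ 1 is exactly (cs.drop i).take k.toNat; the sum of
-- the 0/1 generator over the range is List.countP.
def numberOfSpecialKLengthSubstrings_alt (s : String) (k : Int) : Int :=
  let cs := s.toList
  if k < 1 ∨ (cs.length : Int) < k then 0
  else ((List.range (cs.length - k.toNat + 1)).countP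
      (fun i => PySem.Set.len (PySem.Set.ofList ((cs.drop i).take k.toNat)) == k) : Int)

-- ===== PRECONDITION & SPEC =====
def Spec_numberOfSpecialKLengthSubstrings (s : String) (k : Int) (out : Int) : Prop := out = numberOfSpecialKLengthSubstrings_alt s k
instance (s : String) (k : Int) (out : Int) : Decidable (Spec_numberOfSpecialKLengthSubstrings s k out) := by unfold Spec_numberOfSpecialKLengthSubstrings; infer_instance

-- ===== CLAIM (what is proved, stated in full; the proofs are below) =====
def Claim_equal_numberOfSpecialKLengthSubstrings : Prop := ∀ (s : String) (k : Int), Dom_numberOfSpecialKLengthSubstrings s k → Spec_numberOfSpecialKLengthSubstrings s k (numberOfSpecialKLengthSubstrings s k)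

-- ===== LEMMAS AND PROOFS =====

-- the window s[l:r] as a list
def pvWin (cs : List Char) (l r : Nat) : List Char := (cs.drop l).take (r - l)

theorem pvWin_self (cs : List Char) (l : Nat) : pvWin cs l l = [] := by simp [pvWin]

theorem pvWin_succ_right (cs : List Char) (l r : Nat) (hl : l ≤ r) (hr : r < cs.length) :
    pvWin cs l (r + 1) = pvWin cs l r ++ [cs.getD r ' '] := by
  unfold pvWin
  have h1 : r + 1 - l = (r - l) + 1 := by omega
  rw [h1, List.take_add_one]
  have h2 : (cs.drop l)[r - l]? = cs[r]? := by
    rw [List.getElem?_drop]; congr 1; omega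
  rw [h2, List.getElem?_eq_getElem hr]
  simp [List.getD, List.getElem?_eq_getElem hr]

theorem pvWin_cons (cs : List Char) (l r : Nat) (hl : l < r) (hn : l < cs.length) :
    pvWin cs l r = cs.getD l ' ' :: pvWin cs (l + 1) r := by
  unfold pvWin
  rw [List.drop_eq_getElem_cons hn]
  have h1 : r - l = (r - (l+1)) + 1 := by omega
  rw [h1, List.take_succ_cons]
  simp [List.getD, List.getElem?_eq_getElem hn]

theorem pvWin_drop (cs : List Char) (l l' r : Nat) (h : l ≤ l') :
    pvWin cs l' r = (pvWin cs l r).drop (l' - l) := by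
  unfold pvWin
  rw [List.drop_take, List.drop_drop]
  have e1 : l + (l' - l) = l' := by omega
  have e2 : r - l - (l' - l) = r - l' := by omega
  rw [e1, e2]

theorem pvWin_nodup_mono (cs : List Char) (l l' r : Nat) (h : l ≤ l')
    (hnd : (pvWin cs l r).Nodup) : (pvWin cs l' r).Nodup := by
  rw [pvWin_drop cs l l' r h]
  exact hnd.sublist (List.drop_sublist _ _)

-- the while loop: starting from the window s[l:r] (duplicate-free), it stops at the
-- first l' ≥ l whose window no longer contains c
theorem pvWhileA_spec (cs : List Char) (c : Char) (r : Nat) (hr : r ≤ cs.length) :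
    ∀ (fuel l : Nat), l ≤ r → r - l ≤ fuel → (pvWin cs l r).Nodup →
    ∃ l', pvWhileA cs c fuel l (pvWin cs l r) = (l', pvWin cs l' r) ∧
      l ≤ l' ∧ l' ≤ r ∧ c ∉ pvWin cs l' r ∧ ∀ j, l ≤ j → j < l' → c ∈ pvWin cs j r := by
  intro fuel
  induction fuel with
  | zero =>
    intro l hlr hfuel _
    have hlr' : l = r := by omega
    subst hlr'
    refine ⟨l, ?_, le_refl _, le_refl _, by simp [pvWin_self], fun j h1 h2 => absurd (lt_of_le_of_lt h1 h2) (lt_irrefl _)⟩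
    simp [pvWhileA, pvWin_self, PySem.Set.contains]
  | succ fuel ih =>
    intro l hlr hfuel hnd
    by_cases hc : c ∈ pvWin cs l r
    · have hlt : l < r := by
        rcases Nat.lt_or_ge l r with h | h
        · exact h
        · have : l = r := by omega
          subst this; rw [pvWin_self] at hc; simp at hc
      have hcont : PySem.Set.contains (pvWin cs l r) c = true := by
        simp; exact hc
      have hwin := pvWin_cons cs l r hlt (lt_of_lt_of_le hlt hr)
      have hx : cs.getD l ' ' ∉ pvWin cs (l+1) r := by
        rw [hwin] at hnd; exact (List.nodup_cons.mp hnd).1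
      have hnd' : (pvWin cs (l+1) r).Nodup := by
        rw [hwin] at hnd; exact (List.nodup_cons.mp hnd).2
      have hdis : PySem.Set.discard (pvWin cs l r) (cs.getD l ' ') = pvWin cs (l+1) r := by
        rw [hwin]
        simp only [PySem.Set.discard, List.filter_cons, beq_self_eq_true, Bool.not_true]
        rw [if_neg (by simp), List.filter_eq_self.mpr]
        intro y hy
        simpa using (ne_of_mem_of_not_mem hy hx)
      obtain ⟨l', heq, h1, h2, h3, h4⟩ := ih (l+1) hlt (by omega) hnd'
      refine ⟨l', ?_, by omega, h2, h3, ?_⟩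
      · rw [pvWhileA, if_pos hcont, hdis]; exact heq
      · intro j hj1 hj2
        rcases Nat.eq_or_lt_of_le hj1 with h | h
        · rw [← h]; exact hc
        · exact h4 j h hj2
    · have hcont : ¬ PySem.Set.contains (pvWin cs l r) c = true := by
        simp; exact hc
      refine ⟨l, ?_, le_refl _, hlr, hc, fun j h1 h2 => absurd (lt_of_le_of_lt h1 h2) (lt_irrefl _)⟩
      rw [pvWhileA, if_neg hcont]

-- the main-loop invariant for 1 ≤ k:  left ≤ right, char_set is exactly the window
-- s[left:right] (duplicate-free, shorter than k), any window that ends past right and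
-- starts before left has a duplicate, and count counts the distinct k-windows decided so far
def pvInv (cs : List Char) (kn : Nat) (r : Nat) (st : Nat × Int × PySem.Set Char) : Prop :=
  st.1 ≤ r ∧ st.2.2 = pvWin cs st.1 r ∧ (pvWin cs st.1 r).Nodup ∧ r - st.1 < kn ∧
  (∀ j, j < st.1 → r < j + kn → ¬ (pvWin cs j r).Nodup) ∧
  st.2.1 = ((List.range (r + 1 - kn)).countP (fun i => decide ((pvWin cs i (i + kn)).Nodup)) : Int)

theorem pvStepA_inv (cs : List Char) (kn : Nat) (_hk : 1 ≤ kn) (r : Nat) (hr : r < cs.length)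
    (st : Nat × Int × PySem.Set Char) (h : pvInv cs kn r st) :
    pvInv cs kn (r + 1) (pvStepA cs ((kn : Int)) st r) := by
  obtain ⟨l, cnt, cset⟩ := st
  obtain ⟨h1, h2, h3, h4, h5, h6⟩ := h
  simp only at h1 h2 h3 h4 h5 h6
  obtain ⟨l', heq, hll', hl'r, hc, hmin⟩ :=
    pvWhileA_spec cs (cs.getD r ' ') r (le_of_lt hr) cs.length l h1 (by omega) h3
  have hwinS : pvWin cs l' (r + 1) = pvWin cs l' r ++ [cs.getD r ' '] :=
    pvWin_succ_right cs l' r hl'r hr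
  have hndl' : (pvWin cs l' r).Nodup := pvWin_nodup_mono cs l l' r hll' h3
  have hndS : (pvWin cs l' (r + 1)).Nodup := by
    rw [hwinS]
    simp only [List.nodup_append, List.nodup_singleton, true_and]
    refine ⟨hndl', ?_⟩
    intro a ha b hb
    simp only [List.mem_singleton] at hb
    subst hb
    exact fun h => hc (h ▸ ha)
  have hadd : PySem.Set.add (pvWin cs l' r) (cs.getD r ' ') = pvWin cs l' (r + 1) := by
    rw [PySem.Set.add_of_not_mem hc, hwinS]
  -- a window ending at r+1 that starts before l' always has a duplicate
  have hbad : ∀ j, j < l' → r + 1 ≤ j + kn → ¬ (pvWin cs j (r + 1)).Nodup := by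
    intro j hj hjk hndj
    have hjr : j ≤ r := by omega
    have hwj : pvWin cs j (r + 1) = pvWin cs j r ++ [cs.getD r ' '] :=
      pvWin_succ_right cs j r hjr hr
    rcases Nat.lt_or_ge j l with hjl | hjl
    · exact h5 j hjl (by omega) (hndj.sublist (by rw [hwj]; exact List.sublist_append_left _ _))
    · have hcin : cs.getD r ' ' ∈ pvWin cs j r := hmin j hjl hj
      rw [hwj] at hndj
      exact (List.disjoint_of_nodup_append hndj) hcin (List.mem_singleton_self _)
  simp only [pvStepA, h2, heq]
  by_cases hcase : ((r : Int) - (l' : Int) + 1 = (kn : Int))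
  · rw [if_pos hcase]
    have hl'eq : l' + kn = r + 1 := by omega
    have hcons : pvWin cs l' (r + 1) = cs.getD l' ' ' :: pvWin cs (l' + 1) (r + 1) :=
      pvWin_cons cs l' (r + 1) (by omega) (by omega)
    have hdis : PySem.Set.discard (pvWin cs l' (r + 1)) (cs.getD l' ' ') = pvWin cs (l' + 1) (r + 1) := by
      rw [hcons]
      have hx : cs.getD l' ' ' ∉ pvWin cs (l' + 1) (r + 1) := by
        rw [hcons] at hndS; exact (List.nodup_cons.mp hndS).1
      simp only [PySem.Set.discard, List.filter_cons, beq_self_eq_true, Bool.not_true]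
      rw [if_neg (by simp), List.filter_eq_self.mpr]
      intro y hy
      simpa using (ne_of_mem_of_not_mem hy hx)
    refine ⟨by omega, ?_, ?_, by omega, ?_, ?_⟩
    · simp only [hadd, hdis]
    · simp only []
      rw [hcons] at hndS; exact (List.nodup_cons.mp hndS).2
    · intro j hj hjk
      omega
    · simp only []
      have hrange : r + 1 + 1 - kn = (r + 1 - kn) + 1 := by omega
      rw [hrange, List.range_succ, List.countP_append, h6]
      have hi0 : r + 1 - kn = l' := by omega
      have hgood : (pvWin cs (r + 1 - kn) (r + 1 - kn + kn)).Nodup := by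
        rw [hi0]
        have e : l' + kn = r + 1 := by omega
        rw [e]; exact hndS
      simp [hgood]
  · rw [if_neg hcase]
    have hne : ¬ (r + 1 - l' = kn) := by
      intro hcontra; apply hcase; omega
    refine ⟨by omega, ?_, ?_, by omega, ?_, ?_⟩
    · simp only [hadd]
    · simp only []; exact hndS
    · intro j hj hjk
      exact hbad j hj (by omega)
    · simp only []
      rw [h6]
      congr 1
      rcases Nat.lt_or_ge (r + 1) kn with hsm | hlg
      · have e : r + 1 + 1 - kn = r + 1 - kn := by omega
        rw [e]
      · have e : r + 1 + 1 - kn = (r + 1 - kn) + 1 := by omega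
        rw [e, List.range_succ, List.countP_append]
        have hi0lt : r + 1 - kn < l' := by omega
        have hdup : ¬ (pvWin cs (r + 1 - kn) (r + 1 - kn + kn)).Nodup := by
          have e2 : r + 1 - kn + kn = r + 1 := by omega
          rw [e2]
          exact hbad _ hi0lt (by omega)
        simp [hdup]

theorem pvFoldA_inv (cs : List Char) (kn : Nat) (hk : 1 ≤ kn) (r : Nat) :
    r ≤ cs.length →
    pvInv cs kn r ((List.range r).foldl (pvStepA cs ((kn : Int))) (0, 0, PySem.Set.empty)) := by
  induction r with
  | zero =>
    intro _
    simp only [List.range_zero, List.foldl_nil]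
    refine ⟨le_refl _, by simp [pvWin_self, PySem.Set.empty], by simp [pvWin_self], by omega,
      fun j hj _ => absurd hj (by omega), ?_⟩
    have e : 0 + 1 - kn = 0 := by omega
    simp [e]
  | succ r ih =>
    intro hr
    rw [List.range_succ, List.foldl_append, List.foldl_cons, List.foldl_nil]
    exact pvStepA_inv cs kn hk r (by omega) _ (ih (by omega))

-- for k ≤ 0 the `right - left + 1 == k` test never fires: count stays 0
def pvInv0 (cs : List Char) (r : Nat) (st : Nat × Int × PySem.Set Char) : Prop :=
  st.1 ≤ r ∧ st.2.2 = pvWin cs st.1 r ∧ (pvWin cs st.1 r).Nodup ∧ st.2.1 = 0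

theorem pvFoldA_inv0 (cs : List Char) (k : Int) (hk : k ≤ 0) (r : Nat) :
    r ≤ cs.length →
    pvInv0 cs r ((List.range r).foldl (pvStepA cs k) (0, 0, PySem.Set.empty)) := by
  induction r with
  | zero =>
    intro _
    simp only [List.range_zero, List.foldl_nil]
    exact ⟨le_refl _, by simp [pvWin_self, PySem.Set.empty], by simp [pvWin_self], rfl⟩
  | succ r ih =>
    intro hr
    rw [List.range_succ, List.foldl_append, List.foldl_cons, List.foldl_nil]
    obtain ⟨h1, h2, h3, h4⟩ := ih (by omega)
    set st := (List.range r).foldl (pvStepA cs k) (0, 0, PySem.Set.empty) with hst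
    obtain ⟨l', heq, hll', hl'r, hc, _⟩ :=
      pvWhileA_spec cs (cs.getD r ' ') r (by omega) cs.length st.1 h1 (by omega) h3
    have hcase : ¬ ((r : Int) - (l' : Int) + 1 = k) := by
      have : (0 : Int) < (r : Int) - (l' : Int) + 1 := by
        have : (l' : Int) ≤ (r : Int) := by exact_mod_cast hl'r
        omega
      omega
    simp only [pvStepA, h2, heq, if_neg hcase]
    refine ⟨by omega, ?_, ?_, h4⟩
    · simp only []
      rw [PySem.Set.add_of_not_mem hc, pvWin_succ_right cs l' r hl'r (by omega)]
    · simp only []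
      rw [pvWin_succ_right cs l' r hl'r (by omega)]
      simp only [List.nodup_append, List.nodup_singleton, true_and]
      refine ⟨pvWin_nodup_mono cs st.1 l' r hll' h3, ?_⟩
      intro a ha b hb
      simp only [List.mem_singleton] at hb
      subst hb
      exact fun h => hc (h ▸ ha)

-- set(l) is a sublist of l, hence |set(l)| = |l| iff l has no duplicates
theorem pvOfList_sublist {α : Type} [BEq α] [LawfulBEq α] (l : List α) :
    (PySem.Set.ofList l).Sublist l := by
  induction l with
  | nil => simp [PySem.Set.ofList_nil]
  | cons x xs ih =>
    rw [PySem.Set.ofList_cons]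
    refine List.Sublist.cons₂ x ?_
    simp only [PySem.Set.discard]
    exact List.Sublist.trans List.filter_sublist ih

theorem pvLenOfList_iff {α : Type} [BEq α] [LawfulBEq α] (l : List α) :
    (PySem.Set.ofList l).length = l.length ↔ l.Nodup := by
  constructor
  · intro h
    have := (pvOfList_sublist l).eq_of_length h
    rw [← this]
    exact PySem.Set.nodup_ofList l
  · intro h
    rw [PySem.Set.ofList_eq_self_of_nodup l h]

-- ===== VERDICT (by name: the statement is the Claim_ definition above) =====
theorem numberOfSpecialKLengthSubstrings_spec : Claim_equal_numberOfSpecialKLengthSubstrings := by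
  intro s k _
  unfold Spec_numberOfSpecialKLengthSubstrings numberOfSpecialKLengthSubstrings numberOfSpecialKLengthSubstrings_alt
  simp only []
  set cs := s.toList with hcs
  by_cases hbig : ((cs.length : Int)) < k
  · rw [if_pos hbig, if_pos (Or.inr hbig)]
  · rw [if_neg hbig]
    by_cases hk0 : k < 1
    · rw [if_pos (Or.inl hk0)]
      exact (pvFoldA_inv0 cs k (by omega) cs.length (le_refl _)).2.2.2
    · rw [if_neg (fun h => by rcases h with h | h <;> omega)]
      set kn := k.toNat with hknd
      have hkk : ((kn : Int)) = k := Int.toNat_of_nonneg (by omega)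
      have hk1 : 1 ≤ kn := by omega
      have hkn : kn ≤ cs.length := by omega
      have hf := (pvFoldA_inv cs kn hk1 cs.length (le_refl _)).2.2.2.2.2
      rw [← hkk, hf]
      congr 1
      have e : cs.length + 1 - kn = cs.length - kn + 1 := by omega
      rw [e]
      apply List.countP_congr
      intro i hi
      have hik : i + kn ≤ cs.length := by
        have := List.mem_range.mp hi
        omega
      have hw : pvWin cs i (i + kn) = (cs.drop i).take kn := by
        unfold pvWin
        rw [Nat.add_sub_cancel_left]
      set w := (cs.drop i).take kn with hwd
      have hlen : w.length = kn := by
        rw [hwd]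
        simp only [List.length_take, List.length_drop]
        omega
      rw [hw]
      by_cases hnd : w.Nodup
      · rw [PySem.Set.ofList_eq_self_of_nodup w hnd]
        simp [PySem.Set.len, hlen, hnd]
      · have hne : (PySem.Set.ofList w).length ≠ kn := by
          intro hcontra
          exact hnd ((pvLenOfList_iff w).mp (by rw [hcontra, hlen]))
        have hb : ((PySem.Set.ofList w).len == ((kn : Int))) = false := by
          simp only [PySem.Set.len, beq_eq_false_iff_ne, ne_eq]
          intro hcontra
          apply hne
          exact_mod_cast hcontra
        rw [hb, decide_eq_false hnd]
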